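-- pv_equiv track=rewrite | github.com/Moana63/Algorithmes_et_Genomes | Sequence d'ADN/P3.py | coordonees_chemin
-- ===== SOURCE A (Python) =====
-- moves = {
-- 	"A": [0,1],
-- 	"T": [0,-1],
-- 	"G": [-1,0],
-- 	"C": [1,0]
-- }
--
-- def coordonees_chemin (Sequence, multiple):
-- 	list_x,list_y=[],[]
-- 	x, y = 0, 0          #on démarre a 0 sur le graphique, point d'origine
-- 	list_x.append (x)    #on ajoute les coordonées x et y du point de départ a la liste
-- 	list_y.append(y)
--
-- 	for position, lettre in enumerate(Sequence):   #enumerate permet de traiter l'index (position) et la premiere sous unité de la chaine de caratere (lettre) en une seule opération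
-- 		delta_x, delta_y= moves[lettre]  #on assigne les coordonnées a chaque lettre de la sequence a l'aide des correspondances stockées dans le dictionnaire
-- 		x += delta_x                     # les valeurs de x et y sont modifiées apres chaque lecture de lettre
-- 		y += delta_y
-- 		if position % multiple ==0:          #on realise l'operation precedente pour chaque lettre dont la position est un multiple de la valeur "multiple" que l'on renseigne lors de l'utilisation de la fonction
-- 			list_x.append (x)                #on ajoute aux listes list_x et list_y les nouvelles coordonées de x et y apres chaque lecture de lettre,
-- 			list_y.append(y)                 # dont la position est un multiple de "multiple" ( ne s'applique pas a toutes les lettres)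
-- 	return list_x,list_y
-- ===== SOURCE B (Python) =====
-- moves = {
--     "A": [0, 1],
--     "T": [0, -1],
--     "G": [-1, 0],
--     "C": [1, 0]
-- }
--
-- def coordonees_chemin(Sequence, multiple):
--     # Pass 1: full cumulative coordinate tables (origin at index 0).
--     coords_x, coords_y = [0], [0]
--     for lettre in Sequence:
--         delta_x, delta_y = moves[lettre]
--         coords_x.append(coords_x[-1] + delta_x)
--         coords_y.append(coords_y[-1] + delta_y)
--     # Pass 2: sample the tables at the positions the modulo filter keeps.
--     picks = [p for p in range(len(Sequence)) if p % multiple == 0]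
--     return ([0] + [coords_x[p + 1] for p in picks],
--             [0] + [coords_y[p + 1] for p in picks])
-- ===== Notes on version B (the rewrite author's own statement) =====
-- stated objective: alternative
-- what changed: B replaces A's single stateful walk (running x,y with a conditional append inside the loop) by two passes: it first builds full cumulative coordinate tables including the origin, then samples those tables at the modulo-selected positions p via index p+1.
import Mathlib
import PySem

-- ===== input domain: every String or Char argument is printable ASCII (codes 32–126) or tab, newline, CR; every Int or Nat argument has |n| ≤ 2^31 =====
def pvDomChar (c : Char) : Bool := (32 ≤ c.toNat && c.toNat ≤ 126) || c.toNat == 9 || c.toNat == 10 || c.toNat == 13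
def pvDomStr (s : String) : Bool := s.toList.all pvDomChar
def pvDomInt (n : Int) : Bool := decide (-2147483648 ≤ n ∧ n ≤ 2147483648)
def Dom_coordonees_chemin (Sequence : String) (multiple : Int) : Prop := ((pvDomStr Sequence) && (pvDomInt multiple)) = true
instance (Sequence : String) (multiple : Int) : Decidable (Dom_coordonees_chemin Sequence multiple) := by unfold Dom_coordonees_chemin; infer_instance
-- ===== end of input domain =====

-- B builds full cumulative coordinate tables in one pass, then samples them at the
-- modulo-selected positions — an alternative two-pass decomposition of A's single stateful walk.


-- ===== PORT A =====
-- the module-level dict 'moves' (values are the two deltas, kept as a pair)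
def movesDict : PySem.Dict Char (Int × Int) :=
  PySem.Dict.ofList [('A', (0, 1)), ('T', (0, -1)), ('G', (-1, 0)), ('C', (1, 0))]

-- one iteration of A's for-loop over enumerate(Sequence); the getD default (0,0) is
-- never used under Pre_ (a missing key is a KeyError, excluded by Pre_)
def stepA (multiple : Int) (st : List Int × List Int × Int × Int) (pl : Int × Char) :
    List Int × List Int × Int × Int :=
  let d := movesDict.getD pl.2 (0, 0)
  let x := st.2.2.1 + d.1
  let y := st.2.2.2 + d.2
  if PySem.Int.mod pl.1 multiple = 0 then (st.1 ++ [x], st.2.1 ++ [y], x, y)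
  else (st.1, st.2.1, x, y)

def coordonees_chemin (Sequence : String) (multiple : Int) : List Int × List Int :=
  let st := (PySem.List.enumerate Sequence.toList 0).foldl (stepA multiple) ([0], [0], 0, 0)
  (st.1, st.2.1)

-- ===== PORT B =====
-- pass 1 of Source B: the cumulative table [0, x1, x2, …] built by appending last+delta
def pvPrefix (x : Int) : List Int → List Int
  | [] => [x]
  | d :: ds => x :: pvPrefix (x + d) ds

def coordonees_chemin_alt (Sequence : String) (multiple : Int) : List Int × List Int :=
  let deltas := Sequence.toList.map (fun c => movesDict.getD c (0, 0))
  let cx := pvPrefix 0 (deltas.map (·.1))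
  let cy := pvPrefix 0 (deltas.map (·.2))
  let picks := (PySem.List.pyRange 0 (PySem.Str.len Sequence) 1).filter
      (fun p => PySem.Int.mod p multiple = 0)
  -- coords_x[p+1]: always in range (0 ≤ p < len), so getD is exact here
  (0 :: picks.map (fun p => cx.getD (p + 1).toNat 0),
   0 :: picks.map (fun p => cy.getD (p + 1).toNat 0))

-- ===== PRECONDITION & SPEC =====
-- Pre_ excludes exactly where A raises: a letter outside "ATGC" is a KeyError, and
-- multiple = 0 with a nonempty sequence is a ZeroDivisionError (B raises there too).
def Pre_coordonees_chemin (Sequence : String) (multiple : Int) : Prop :=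
  Sequence.toList.all (fun c => c == 'A' || c == 'T' || c == 'G' || c == 'C') = true ∧
  (multiple ≠ 0 ∨ Sequence = "")
instance (Sequence : String) (multiple : Int) : Decidable (Pre_coordonees_chemin Sequence multiple) := by
  unfold Pre_coordonees_chemin; infer_instance
def pvWitness_coordonees_chemin : String × Int := ("AT", 2)

def Spec_coordonees_chemin (Sequence : String) (multiple : Int) (out : List Int × List Int) : Prop := out = coordonees_chemin_alt Sequence multiple
instance (Sequence : String) (multiple : Int) (out : List Int × List Int) : Decidable (Spec_coordonees_chemin Sequence multiple out) := by unfold Spec_coordonees_chemin; infer_instance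

-- ===== CLAIM (what is proved, stated in full; the proofs are below) =====
def Claim_equal_coordonees_chemin : Prop := ∀ (Sequence : String) (multiple : Int), Dom_coordonees_chemin Sequence multiple → Pre_coordonees_chemin Sequence multiple → Spec_coordonees_chemin Sequence multiple (coordonees_chemin Sequence multiple)

-- ===== LEMMAS AND PROOFS =====

-- the x-delta (resp. y-delta) of a letter
def mvx (c : Char) : Int := (movesDict.getD c (0, 0)).1
def mvy (c : Char) : Int := (movesDict.getD c (0, 0)).2

-- reference list: the coordinates appended while scanning l from position s, accumulator x
def refC (m : Int) (f : Char → Int) : List Char → Int → Int → List Int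
  | [], _, _ => []
  | c :: cs, s, x =>
      (if PySem.Int.mod s m = 0 then [x + f c] else []) ++ refC m f cs (s + 1) (x + f c)

theorem A_fold (m : Int) (l : List Char) : ∀ (s : Int) (lx ly : List Int) (x y : Int),
    (PySem.List.enumerate l s).foldl (stepA m) (lx, ly, x, y)
      = (lx ++ refC m mvx l s x, ly ++ refC m mvy l s y,
         x + (l.map mvx).sum, y + (l.map mvy).sum) := by
  induction l with
  | nil => intro s lx ly x y; simp [refC, PySem.List.enumerate]
  | cons c cs ih =>
    intro s lx ly x y
    rw [PySem.List.enumerate_cons, List.foldl_cons]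
    by_cases h : PySem.Int.mod s m = 0 <;>
      simp [stepA, h, ih, refC, mvx, mvy, List.append_assoc] <;> ring_nf <;> simp

theorem pvPrefix_getD_zero (ds : List Int) (x : Int) : (pvPrefix x ds).getD 0 0 = x := by
  cases ds <;> rfl

theorem B_pass (m : Int) (f : Char → Int) (l : List Char) :
    ∀ (front : List Int) (x : Int),
    ((PySem.List.pyRange (front.length : Int) ((front.length : Int) + l.length) 1).filter
        (fun p => decide (PySem.Int.mod p m = 0))).map
        (fun p => (front ++ pvPrefix x (l.map f)).getD (p + 1).toNat 0)
      = refC m f l (front.length) x := by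
  induction l with
  | nil =>
    intro front x
    rw [show ((front.length : Int) + ([] : List Char).length) = (front.length : Int) by simp,
        PySem.List.pyRange_one_eq_nil le_rfl]
    simp [refC]
  | cons c cs ih =>
    intro front x
    have hlt : (front.length : Int) < (front.length : Int) + ((c :: cs : List Char)).length := by
      simp only [List.length_cons]; push_cast; omega
    rw [PySem.List.pyRange_one_cons hlt, List.filter_cons]
    have hlist : front ++ pvPrefix x ((c :: cs).map f)
        = (front ++ [x]) ++ pvPrefix (x + f c) (cs.map f) := by
      simp [pvPrefix]
    have hih := ih (front ++ [x]) (x + f c)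
    have e2 : ((front ++ [x]).length : Int) + (cs.length : Int)
        = (front.length : Int) + ((c :: cs : List Char)).length := by
      simp only [List.length_cons, List.length_append, List.length_nil]; push_cast; ring
    have e1 : ((front ++ [x]).length : Int) = (front.length : Int) + 1 := by simp
    rw [e2, e1] at hih
    by_cases h : PySem.Int.mod (front.length : Int) m = 0
    · rw [if_pos (by simp [h]), List.map_cons, hlist, hih]
      have ht : ((front.length : Int) + 1).toNat = (front ++ [x]).length := by
        simp only [List.length_append, List.length_cons, List.length_nil]; omega
      rw [ht, List.getD_append_right _ _ _ _ le_rfl, Nat.sub_self, pvPrefix_getD_zero]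
      simp [refC, h]
    · rw [if_neg (by simp [h]), hlist, hih]
      simp [refC, h]

-- ===== VERDICT (by name: the statement is the Claim_ definition above) =====
theorem coordonees_chemin_spec : Claim_equal_coordonees_chemin := by
  intro S m _ _
  unfold Spec_coordonees_chemin coordonees_chemin coordonees_chemin_alt
  rw [A_fold m S.toList 0]
  have hx := B_pass m mvx S.toList [] 0
  have hy := B_pass m mvy S.toList [] 0
  simp only [List.length_nil, Nat.cast_zero, zero_add, List.nil_append] at hx hy
  have hmx : ((fun p : Int × Int => p.1) ∘ fun c => movesDict.getD c (0, 0)) = mvx := rfl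
  have hmy : ((fun p : Int × Int => p.2) ∘ fun c => movesDict.getD c (0, 0)) = mvy := rfl
  simp only [List.map_map, hmx, hmy, PySem.Str.len_eq]
  rw [hx, hy]
  simp
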